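-- pv_equiv track=rewrite | github.com/MrBrantCode/unitest_baseline | mut_generate/mist_train_taco/taco_7462/solution.py | min_operations_to_m_perfect
-- ===== SOURCE A (Python) =====
-- def min_operations_to_m_perfect(x: int, y: int, m: int) -> int:
--     # If either x or y is already m-perfect, no operations are needed
--     if x >= m or y >= m:
--         return 0
--
--     # If both x and y are non-positive and less than m, it's impossible to make them m-perfect
--     if x <= 0 and y <= 0:
--         return -1
--
--     # Initialize the number of operations
--     ans = 0
--
--     # Ensure x is the larger number and y is the smaller number
--     if x < y:
--         x, y = y, x
--
--     # If y is negative, we need to make it non-negative first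
--     if y < 0:
--         # Calculate the number of operations needed to make y non-negative
--         ans += (abs(y) + x - 1) // x  # This is equivalent to ceil(abs(y) / x)
--         y += ans * x
--
--     # Now both x and y are non-negative
--     while x < m and y < m:
--         if x < y:
--             x, y = y, x
--         y += x
--         ans += 1
--
--     return ans
-- ===== SOURCE B (Python) =====
-- def _steps(a, b, m):
--     # number of Fibonacci-style steps until the larger value reaches m
--     if a >= m:
--         return 0
--     return 1 + _steps(a + b, a, m)
--
--
-- def min_operations_to_m_perfect(x: int, y: int, m: int) -> int:
--     if x >= m or y >= m:
--         return 0
--     if x <= 0 and y <= 0: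
--         return -1
--     a, b = max(x, y), min(x, y)
--     if b < 0:
--         k = -(b // a)  # ceil(-b / a), since a > 0
--         return k + _steps(a, b + k * a, m)
--     return _steps(a, b, m)
-- ===== Notes on version B (the rewrite author's own statement) =====
-- stated objective: simpler
-- what changed: A's in-place swap-inside-while loop with a separate abs-based ceiling block is replaced by a recursive Fibonacci-step helper on the sorted (max, min) pair, with the negative-phase jump computed as -(b // a) instead of (abs(y)+x-1)//x.
import Mathlib
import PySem

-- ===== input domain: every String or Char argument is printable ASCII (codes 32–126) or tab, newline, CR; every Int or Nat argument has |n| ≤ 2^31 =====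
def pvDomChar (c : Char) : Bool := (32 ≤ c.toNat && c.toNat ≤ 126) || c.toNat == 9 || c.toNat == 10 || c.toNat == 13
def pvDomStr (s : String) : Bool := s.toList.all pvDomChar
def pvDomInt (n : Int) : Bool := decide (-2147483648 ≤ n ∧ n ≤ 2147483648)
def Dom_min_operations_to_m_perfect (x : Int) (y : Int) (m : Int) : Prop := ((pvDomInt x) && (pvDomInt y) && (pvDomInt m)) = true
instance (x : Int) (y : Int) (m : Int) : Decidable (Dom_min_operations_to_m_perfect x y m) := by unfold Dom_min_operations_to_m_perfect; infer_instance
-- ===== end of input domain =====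

-- B replaces A's swap-in-a-while-loop plus the abs-based ceiling block by a recursive
-- Fibonacci-step helper on a (max, min) pair with the ceiling taken as -(b // a); objective: simpler.

-- fuel bound making both loop helpers total (the sum x+y grows by at least 1 per
-- iteration while both values are below m, so this fuel is never exhausted on the
-- states the ports reach; the equivalence proof never needs its adequacy)
def pvFuel (x : Int) (y : Int) (m : Int) : Nat := (2 * m - x - y).toNat + 1

-- ===== PORT A =====
-- A's while loop: `while x < m and y < m: if x < y: x, y = y, x; y += x; ans += 1`
def pvA_loop : Nat → Int → Int → Int → Int → Int
  | 0, _, _, _, ans => ans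
  | f + 1, x, y, m, ans =>
    if x < m ∧ y < m then
      if x < y then pvA_loop f y (x + y) m (ans + 1)
      else pvA_loop f x (y + x) m (ans + 1)
    else ans

-- A after the swap (x1 ≥ y1): the negative-y closed form, then the loop.
-- `ans += (abs(y) + x - 1) // x; y += ans * x` with ans previously 0.
def pvA_main (x1 : Int) (y1 : Int) (m : Int) : Int :=
  if y1 < 0 then
    pvA_loop (pvFuel x1 (y1 + PySem.Int.floordiv (|y1| + x1 - 1) x1 * x1) m) x1
      (y1 + PySem.Int.floordiv (|y1| + x1 - 1) x1 * x1) m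
      (PySem.Int.floordiv (|y1| + x1 - 1) x1)
  else pvA_loop (pvFuel x1 y1 m) x1 y1 m 0

def min_operations_to_m_perfect (x : Int) (y : Int) (m : Int) : Int :=
  if x ≥ m ∨ y ≥ m then 0
  else if x ≤ 0 ∧ y ≤ 0 then -1
  else if x < y then pvA_main y x m else pvA_main x y m

-- ===== PORT B =====
-- Source B's `_steps(a, b, m)`: if a >= m: return 0; return 1 + _steps(a + b, a, m)
def pvB_steps : Nat → Int → Int → Int → Int
  | 0, _, _, _ => 0
  | f + 1, a, b, m => if a ≥ m then 0 else 1 + pvB_steps f (a + b) a m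

-- Source B's body after the guards, on (a, b) = (max, min);
-- k = -(b // a) is ceil(-b / a) since a > 0
def pvB_main (a : Int) (b : Int) (m : Int) : Int :=
  if b < 0 then
    -(PySem.Int.floordiv b a) +
      pvB_steps (pvFuel a (b + -(PySem.Int.floordiv b a) * a) m) a
        (b + -(PySem.Int.floordiv b a) * a) m
  else pvB_steps (pvFuel a b m) a b m

def min_operations_to_m_perfect_alt (x : Int) (y : Int) (m : Int) : Int :=
  if x ≥ m ∨ y ≥ m then 0
  else if x ≤ 0 ∧ y ≤ 0 then -1
  else pvB_main (max x y) (min x y) m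

-- ===== PRECONDITION & SPEC =====
def Spec_min_operations_to_m_perfect (x : Int) (y : Int) (m : Int) (out : Int) : Prop := out = min_operations_to_m_perfect_alt x y m
instance (x : Int) (y : Int) (m : Int) (out : Int) : Decidable (Spec_min_operations_to_m_perfect x y m out) := by unfold Spec_min_operations_to_m_perfect; infer_instance

-- ===== CLAIM (what is proved, stated in full; the proofs are below) =====
def Claim_equal_min_operations_to_m_perfect : Prop := ∀ (x : Int) (y : Int) (m : Int), Dom_min_operations_to_m_perfect x y m → Spec_min_operations_to_m_perfect x y m (min_operations_to_m_perfect x y m)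

-- ===== LEMMAS AND PROOFS =====

-- A's loop carrying (x, y, ans) computes ans plus B's step count on the sorted pair,
-- for any fuel, as long as both values are nonnegative.
theorem pv_loop_eq (f : Nat) : ∀ (x y m ans : Int), 0 ≤ min x y →
    pvA_loop f x y m ans = ans + pvB_steps f (max x y) (min x y) m := by
  induction f with
  | zero => intro x y m ans _; simp [pvA_loop, pvB_steps]
  | succ f ih =>
    intro x y m ans h
    simp only [pvA_loop, pvB_steps]
    by_cases hc : x < m ∧ y < m
    · rw [if_pos hc, if_neg (by omega : ¬ max x y ≥ m)]
      by_cases hxy : x < y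
      · rw [if_pos hxy, ih y (x + y) m (ans + 1) (by omega)]
        have h1 : max y (x + y) = x + y := by omega
        have h2 : min y (x + y) = y := by omega
        have h3 : max x y + min x y = x + y := by omega
        have h4 : max x y = y := by omega
        rw [h1, h2, h3, h4]; ring
      · rw [if_neg hxy, ih x (y + x) m (ans + 1) (by omega)]
        have h1 : max x (y + x) = y + x := by omega
        have h2 : min x (y + x) = x := by omega
        have h3 : max x y + min x y = y + x := by omega
        have h4 : max x y = x := by omega
        rw [h1, h2, h3, h4]; ring
    · rw [if_neg hc, if_pos (by omega : max x y ≥ m)]; ring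

-- A's ceiling formula (|b| + a - 1) // a equals B's -(b // a) for a > 0, b < 0.
theorem pv_ceil_eq (a b : Int) (ha : 0 < a) (hb : b < 0) :
    PySem.Int.floordiv (|b| + a - 1) a = -(PySem.Int.floordiv b a) := by
  rw [PySem.Int.floordiv_eq_ediv_of_pos ha, PySem.Int.floordiv_eq_ediv_of_pos ha,
    abs_of_neg hb]
  have hdm := Int.ediv_add_emod b a
  have hr0 : 0 ≤ b % a := Int.emod_nonneg _ (ne_of_gt ha)
  have hrx : b % a < a := Int.emod_lt_of_pos _ ha
  have key : -b + a - 1 = (a - 1 - b % a) + -(b / a) * a := by linear_combination hdm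
  rw [key, Int.add_mul_ediv_right _ _ (ne_of_gt ha),
    Int.ediv_eq_zero_of_lt (by linarith) (by linarith), zero_add]

-- after the closed-form jump, b + -(b/a)*a is b's remainder mod a, hence in [0, a)
theorem pv_jump_mem (a b : Int) (ha : 0 < a) :
    0 ≤ b + -(PySem.Int.floordiv b a) * a ∧ b + -(PySem.Int.floordiv b a) * a < a := by
  rw [PySem.Int.floordiv_eq_ediv_of_pos ha]
  have hdm := Int.ediv_add_emod b a
  have hr0 : 0 ≤ b % a := Int.emod_nonneg _ (ne_of_gt ha)
  have hrx : b % a < a := Int.emod_lt_of_pos _ ha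
  have : b + -(b / a) * a = b % a := by linear_combination -hdm
  rw [this]; exact ⟨hr0, hrx⟩

theorem pv_main_eq (a b m : Int) (ha : 0 < a) (hba : b ≤ a) :
    pvA_main a b m = pvB_main a b m := by
  unfold pvA_main pvB_main
  by_cases hb : b < 0
  · rw [if_pos hb, if_pos hb, pv_ceil_eq a b ha hb]
    obtain ⟨h0, h1⟩ := pv_jump_mem a b ha
    rw [pv_loop_eq _ a (b + -(PySem.Int.floordiv b a) * a) m _ (by omega)]
    have hmax : max a (b + -(PySem.Int.floordiv b a) * a) = a := by omega
    have hmin : min a (b + -(PySem.Int.floordiv b a) * a)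
        = b + -(PySem.Int.floordiv b a) * a := by omega
    rw [hmax, hmin]
  · rw [if_neg hb, if_neg hb, pv_loop_eq _ a b m 0 (by omega)]
    have hmax : max a b = a := by omega
    have hmin : min a b = b := by omega
    rw [hmax, hmin, zero_add]

-- ===== VERDICT (by name: the statement is the Claim_ definition above) =====
theorem min_operations_to_m_perfect_spec : Claim_equal_min_operations_to_m_perfect := by
  intro x y m _
  unfold Spec_min_operations_to_m_perfect min_operations_to_m_perfect min_operations_to_m_perfect_alt
  by_cases h1 : x ≥ m ∨ y ≥ m
  · rw [if_pos h1, if_pos h1]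
  rw [if_neg h1, if_neg h1]
  by_cases h2 : x ≤ 0 ∧ y ≤ 0
  · rw [if_pos h2, if_pos h2]
  rw [if_neg h2, if_neg h2]
  by_cases hxy : x < y
  · rw [if_pos hxy, (by omega : max x y = y), (by omega : min x y = x)]
    exact pv_main_eq y x m (by omega) (by omega)
  · rw [if_neg hxy, (by omega : max x y = x), (by omega : min x y = y)]
    exact pv_main_eq x y m (by omega) (by omega)
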